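-- pv_equiv track=rewrite | github.com/alex0sunny/probation_tasks | tasks/order_allocation.py | allocate_orders
-- ===== SOURCE A (Python) =====
-- def allocate_orders(score):
--     n = len(score)
--     paths = [[j] for j in range(n)]
--     for _ in range(1, n):
--         nx_paths = []
--         for path in paths:
--             for j in range(n):
--                 if j not in path:
--                     nx_paths.append(path + [j])
--         paths = nx_paths[:]
--     r = 0
--     res_path = []
--     for path in paths:
--         path_sum = sum([score[i][j] for i, j in enumerate(path)])
--         if path_sum > r:
--             r = path_sum
--             res_path = path
--     return res_path
-- ===== SOURCE B (Python) =====
-- def allocate_orders(score):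
--     # DP over subsets of remaining columns (memoized on the tuple of still-free
--     # columns) instead of enumerating all n! permutations; returns the
--     # lexicographically-first optimal assignment, [] when the best total is <= 0.
--     n = len(score)
--     memo = {}
--
--     def best(avail):
--         # best (total, path) assigning rows n-len(avail)..n-1 to the columns in avail
--         if not avail:
--             return (0, [])
--         if avail in memo:
--             return memo[avail]
--         i = n - len(avail)
--         r = None
--         path = None
--         for k in range(len(avail)):
--             j = avail[k]
--             s, rest = best(avail[:k] + avail[k + 1:])
--             s = s + score[i][j]
--             if r is None or s > r:
--                 r = s
--                 path = [j] + rest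
--         memo[avail] = (r, path)
--         return (r, path)
--
--     total, path = best(tuple(range(n)))
--     return path if total > 0 else []
-- ===== Notes on version B (the rewrite author's own statement) =====
-- stated objective: faster
-- what changed: Replaces the n! enumeration of all permutations with a memoized depth-first DP over subsets of still-free columns that keeps the lexicographically-first strict maximum at each level.
import Mathlib
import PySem

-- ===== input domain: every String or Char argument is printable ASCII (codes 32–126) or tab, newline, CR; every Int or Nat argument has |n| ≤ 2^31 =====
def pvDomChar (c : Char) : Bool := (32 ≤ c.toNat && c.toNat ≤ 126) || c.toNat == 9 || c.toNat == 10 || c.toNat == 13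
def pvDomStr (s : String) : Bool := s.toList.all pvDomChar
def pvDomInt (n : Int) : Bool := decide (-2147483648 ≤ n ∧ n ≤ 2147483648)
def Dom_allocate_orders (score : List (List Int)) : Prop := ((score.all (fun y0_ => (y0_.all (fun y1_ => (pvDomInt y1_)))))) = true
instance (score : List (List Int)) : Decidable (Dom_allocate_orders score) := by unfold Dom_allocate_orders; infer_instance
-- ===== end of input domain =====

-- B replaces A's enumeration of all n! permutations by a memoized depth-first DP
-- over the tuple of still-free columns (asymptotically faster; measured faster by the check).

-- ===== PORT A =====
-- sum([score[i][j] for i, j in enumerate(path)])  (IndexError = default never used inside Pre_)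
def sumA (score : List (List Int)) (path : List Int) : Int :=
  ((PySem.List.enumerate path 0).map
    (fun ij => PySem.List.pyGetD (PySem.List.pyGetD score ij.1 []) ij.2 0)).sum

def allocate_orders (score : List (List Int)) : List Int :=
  let n : Int := PySem.List.len score
  let paths0 : List (List Int) := (PySem.List.pyRange 0 n 1).map (fun j => [j])
  let paths : List (List Int) := (PySem.List.pyRange 1 n 1).foldl
    (fun paths _ =>
      paths.foldl
        (fun nx_paths path =>
          (PySem.List.pyRange 0 n 1).foldl
            (fun nx_paths j => if j ∉ path then nx_paths ++ [path ++ [j]] else nx_paths)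
            nx_paths)
        [])
    paths0
  let st := paths.foldl
    (fun (st : Int × List Int) path =>
      let path_sum := sumA score path
      if path_sum > st.1 then (path_sum, path) else st)
    (0, [])
  st.2

-- ===== PORT B =====
-- best(avail): optimal (total, path) for rows n-len(avail).. over free columns avail,
-- memoized on avail; fuel is only a termination guard (always ≥ len(avail) when called).
def bestB (score : List (List Int)) (n : Int) :
    Nat → List Int → PySem.Dict (List Int) (Int × List Int) →
    ((Int × List Int) × PySem.Dict (List Int) (Int × List Int))
  | fuel, avail, memo =>
    if avail = [] then ((0, []), memo)
    else
      match memo.get? avail with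
      | some v => (v, memo)
      | none =>
        match fuel with
        | 0 => ((0, []), memo)
        | f + 1 =>
          let i := n - PySem.List.len avail
          let st := (PySem.List.pyRange 0 (PySem.List.len avail) 1).foldl
            (fun (st : (Option Int × List Int) × PySem.Dict (List Int) (Int × List Int)) k =>
              let j := PySem.List.pyGetD avail k 0
              let sub := PySem.List.slice avail none (some k) ++ PySem.List.slice avail (some (k + 1)) none
              let res := bestB score n f sub st.2
              let s := res.1.1 + PySem.List.pyGetD (PySem.List.pyGetD score i []) j 0
              match st.1.1 with
              | none => ((some s, j :: res.1.2), res.2)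
              | some r => if s > r then ((some s, j :: res.1.2), res.2) else (st.1, res.2))
            ((none, []), memo)
          let r := st.1.1.getD 0
          ((r, st.1.2), st.2.insert avail (r, st.1.2))
  termination_by fuel _ _ => fuel

def allocate_orders_alt (score : List (List Int)) : List Int :=
  let n : Int := PySem.List.len score
  let avail0 := PySem.List.pyRange 0 n 1
  let res := bestB score n avail0.length avail0 PySem.Dict.empty
  if res.1.1 > 0 then res.1.2 else []

-- ===== PRECONDITION & SPEC =====
-- Pre_ excludes exactly the inputs where the Python A raises IndexError
-- (some row shorter than the number of rows, so score[i][j] with j < n fails).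
def Pre_allocate_orders (score : List (List Int)) : Prop :=
  ∀ row ∈ score, score.length ≤ row.length
instance (score : List (List Int)) : Decidable (Pre_allocate_orders score) := by
  unfold Pre_allocate_orders; infer_instance

def pvWitness_allocate_orders : List (List Int) := [[1, 2], [3, 4]]

def Spec_allocate_orders (score : List (List Int)) (out : List Int) : Prop := out = allocate_orders_alt score
instance (score : List (List Int)) (out : List Int) : Decidable (Spec_allocate_orders score out) := by unfold Spec_allocate_orders; infer_instance

-- ===== CLAIM (what is proved, stated in full; the proofs are below) =====
def Claim_equal_allocate_orders : Prop := ∀ (score : List (List Int)), Dom_allocate_orders score → Pre_allocate_orders score → Spec_allocate_orders score (allocate_orders score)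

-- ===== LEMMAS AND PROOFS =====

-- entry score[i][j] as both ports read it
def gAt (score : List (List Int)) (i j : Int) : Int :=
  PySem.List.pyGetD (PySem.List.pyGetD score i []) j 0

-- A's path sum, recursively by row offset
def sumFrom (score : List (List Int)) : Int → List Int → Int
  | _, [] => 0
  | i, j :: q => gAt score i j + sumFrom score (i + 1) q

-- one BFS extension step of a single path (A's inner double loop on one path)
def extend1 (n : Int) (p : List Int) : List (List Int) :=
  ((PySem.List.pyRange 0 n 1).filter (fun j => decide (j ∉ p))).map (fun j => p ++ [j])

-- the whole extension tree below one path
def treeExt (n : Int) : Nat → List Int → List (List Int)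
  | 0, p => [p]
  | m + 1, p => (extend1 n p).flatMap (treeExt n m)

-- all injective m-tuples over avail, in avail's order
def tups : Nat → List Int → List (List Int)
  | 0, _ => [[]]
  | m + 1, avail =>
      avail.flatMap (fun j => (tups m (avail.filter (fun x => decide (x ≠ j)))).map (j :: ·))

-- first-strict-maximum fold
def fstep (acc : Option (Int × List Int)) (sp : Int × List Int) : Option (Int × List Int) :=
  match acc with
  | none => some sp
  | some r => if sp.1 > r.1 then some sp else acc

def fm1 (acc : Option (Int × List Int)) (L : List (Int × List Int)) : Option (Int × List Int) :=
  L.foldl fstep acc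

def mergeA (a : Int × List Int) (o : Option (Int × List Int)) : Int × List Int :=
  match o with
  | none => a
  | some b => if b.1 > a.1 then b else a

-- B's recursion without the memo table
def bestP (score : List (List Int)) : Int → Nat → List Int → Int × List Int
  | _, _, [] => (0, [])
  | _, 0, _ :: _ => (0, [])
  | i, f + 1, a :: t =>
      let st := (a :: t).foldl
        (fun (st : Option Int × List Int) j =>
          let sub := bestP score (i + 1) f ((a :: t).filter (fun x => decide (x ≠ j)))
          let s := sub.1 + gAt score i j
          match st.1 with
          | none => (some s, j :: sub.2)
          | some r => if s > r then (some s, j :: sub.2) else st)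
        (none, [])
      (st.1.getD 0, st.2)
  termination_by _ f _ => f

-- memo entries are always correct
def GoodMemo (score : List (List Int)) (n : Int) (memo : PySem.Dict (List Int) (Int × List Int)) : Prop :=
  ∀ k v, memo.get? k = some v → v = bestP score (n - k.length) k.length k

theorem fm1_append (acc : Option (Int × List Int)) (L1 L2 : List (Int × List Int)) :
    fm1 acc (L1 ++ L2) = fm1 (fm1 acc L1) L2 := by
  simp [fm1, List.foldl_append]

theorem fm1_some (a : Int × List Int) (L : List (Int × List Int)) :
    fm1 (some a) L = some (mergeA a (fm1 none L)) := by
  induction L generalizing a with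
  | nil => rfl
  | cons x t ih =>
    have h1 : fm1 (some a) (x :: t) = fm1 (fstep (some a) x) t := rfl
    have h2 : fm1 none (x :: t) = fm1 (some x) t := rfl
    rw [h1, h2, ih x]
    simp only [fstep]
    split_ifs with h
    · rw [ih x]
      cases hm : fm1 none t with
      | none => simp only [mergeA]; split_ifs <;> rfl
      | some b => simp only [mergeA]; split_ifs <;> first | rfl | (exfalso; omega)
    · rw [ih a]
      cases hm : fm1 none t with
      | none => simp only [mergeA]; split_ifs <;> rfl
      | some b => simp only [mergeA]; split_ifs <;> first | rfl | (exfalso; omega)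

theorem fm1_flatMap (g : Int → List (Int × List Int)) (l : List Int)
    (acc : Option (Int × List Int)) :
    fm1 acc (l.flatMap g) = l.foldl (fun a j => fm1 a (g j)) acc := by
  induction l generalizing acc with
  | nil => rfl
  | cons j t ih => rw [List.flatMap_cons, fm1_append, List.foldl_cons, ih]

theorem fm1_map_mono (c : Int) (j : Int) (L : List (Int × List Int)) :
    fm1 none (L.map (fun sp => (c + sp.1, j :: sp.2)))
      = Option.map (fun sp : Int × List Int => (c + sp.1, j :: sp.2)) (fm1 none L) := by
  have key : ∀ (L : List (Int × List Int)) (acc : Option (Int × List Int)),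
      fm1 (Option.map (fun sp : Int × List Int => (c + sp.1, j :: sp.2)) acc)
          (L.map (fun sp => (c + sp.1, j :: sp.2)))
        = Option.map (fun sp : Int × List Int => (c + sp.1, j :: sp.2)) (fm1 acc L) := by
    intro L
    induction L with
    | nil => intro acc; rfl
    | cons x t ih =>
      intro acc
      show fm1 (fstep _ _) _ = _
      have hs : fstep (Option.map (fun sp : Int × List Int => (c + sp.1, j :: sp.2)) acc)
          (c + x.1, j :: x.2)
          = Option.map (fun sp : Int × List Int => (c + sp.1, j :: sp.2)) (fstep acc x) := by
        cases acc with
        | none => rfl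
        | some r =>
          simp only [fstep, Option.map_some]
          split_ifs <;> first | rfl | (exfalso; omega)
      rw [hs]
      exact ih _
  exact key L none

theorem sel_eq (score : List (List Int)) (L : List (List Int)) (r : Int) (res : List Int) :
    L.foldl
      (fun (st : Int × List Int) path =>
        let path_sum := sumA score path
        if path_sum > st.1 then (path_sum, path) else st)
      (r, res)
    = (match fm1 none (L.map (fun p => (sumA score p, p))) with
       | none => (r, res)
       | some M => if M.1 > r then M else (r, res)) := by
  induction L generalizing r res with
  | nil => rfl
  | cons p t ih =>
    rw [List.foldl_cons]
    rw [show (let path_sum := sumA score p;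
          if path_sum > (r, res).1 then (path_sum, p) else (r, res))
        = if sumA score p > r then (sumA score p, p) else (r, res) from rfl]
    rw [List.map_cons]
    have h1 : fm1 none ((sumA score p, p) :: t.map (fun p => (sumA score p, p)))
        = fm1 (some (sumA score p, p)) (t.map (fun p => (sumA score p, p))) := rfl
    rw [h1, fm1_some]
    cases hm : fm1 none (t.map fun p => (sumA score p, p)) with
    | none =>
      simp only [mergeA]
      split_ifs with h
      · rw [ih, hm]
      · rw [ih, hm]
    | some b =>
      simp only [mergeA]
      split_ifs with h <;> rw [ih, hm] <;> simp only [] <;>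
        split_ifs <;> first | rfl | (exfalso; omega)

theorem sumA_eq (score : List (List Int)) (q : List Int) : sumA score q = sumFrom score 0 q := by
  have key : ∀ (q : List Int) (s : Int),
      ((PySem.List.enumerate q s).map
        (fun ij => PySem.List.pyGetD (PySem.List.pyGetD score ij.1 []) ij.2 0)).sum
      = sumFrom score s q := by
    intro q
    induction q with
    | nil => intro s; rfl
    | cons x t ih =>
      intro s
      rw [PySem.List.enumerate_cons, List.map_cons, List.sum_cons, ih, sumFrom, gAt]
  exact key q 0

theorem stepA_eq (n : Int) (paths : List (List Int)) :
    paths.foldl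
      (fun nx_paths path =>
        (PySem.List.pyRange 0 n 1).foldl
          (fun nx_paths j => if j ∉ path then nx_paths ++ [path ++ [j]] else nx_paths)
          nx_paths)
      []
    = paths.flatMap (extend1 n) := by
  rw [PySem.List.foldl_congr_mem paths _ (fun nx path => nx ++ extend1 n path) []
      (fun acc path _ => PySem.List.foldl_append_ite _ _ _ _)]
  rw [PySem.List.foldl_append_eq_flatMap]
  rfl

theorem iterate_flatMap (n : Int) (m : Nat) (L : List (List Int)) :
    (fun L : List (List Int) => L.flatMap (extend1 n))^[m] L = L.flatMap (treeExt n m) := by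
  induction m generalizing L with
  | zero =>
    rw [Function.iterate_zero_apply,
      show treeExt n 0 = (fun p => [p]) from funext fun p => rfl, List.flatMap_singleton']
  | succ m ih =>
    rw [Function.iterate_succ_apply, ih, List.flatMap_assoc,
      show treeExt n (m + 1) = (fun p => (extend1 n p).flatMap (treeExt n m)) from funext fun p => rfl]

theorem treeExt_eq_tups (n : Int) (m : Nat) (p : List Int) :
    treeExt n m p
      = (tups m ((PySem.List.pyRange 0 n 1).filter (fun j => decide (j ∉ p)))).map (fun q => p ++ q) := by
  induction m generalizing p with
  | zero => simp [treeExt, tups]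
  | succ m ih =>
    have e1 : treeExt n (m + 1) p = (extend1 n p).flatMap (treeExt n m) := rfl
    rw [e1, extend1, List.flatMap_map]
    have e3 : tups (m + 1) ((PySem.List.pyRange 0 n 1).filter (fun x => decide (x ∉ p)))
        = ((PySem.List.pyRange 0 n 1).filter (fun x => decide (x ∉ p))).flatMap
            (fun j => (tups m (((PySem.List.pyRange 0 n 1).filter (fun x => decide (x ∉ p))).filter
              (fun x => decide (x ≠ j)))).map (j :: ·)) := rfl
    rw [e3, List.map_flatMap]
    congr 1
    funext j
    have e2 : treeExt n m (p ++ [j])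
        = (tups m (((PySem.List.pyRange 0 n 1).filter (fun x => decide (x ∉ p))).filter
            (fun x => decide (x ≠ j)))).map (fun q => (p ++ [j]) ++ q) := by
      rw [ih (p ++ [j])]
      congr 2
      rw [List.filter_filter]
      apply List.filter_congr
      intro x _
      by_cases h1 : x = j <;> by_cases h2 : x ∈ p <;> simp [h1, h2, List.mem_append]
    rw [e2, List.map_map]
    congr 1
    funext q
    simp

-- the loop body of bestP, named for reuse in proofs
def pbody (score : List (List Int)) (i : Int) (f : Nat) (avail : List Int) :
    (Option Int × List Int) → Int → (Option Int × List Int) :=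
  fun st j =>
    let sub := bestP score (i + 1) f (avail.filter (fun x => decide (x ≠ j)))
    let s := sub.1 + gAt score i j
    match st.1 with
    | none => (some s, j :: sub.2)
    | some r => if s > r then (some s, j :: sub.2) else st

theorem bestP_cons (score : List (List Int)) (i : Int) (f : Nat) (a : Int) (t : List Int) :
    bestP score i (f + 1) (a :: t)
      = (((a :: t).foldl (pbody score i f (a :: t)) (none, [])).1.getD 0,
         ((a :: t).foldl (pbody score i f (a :: t)) (none, [])).2) := by
  simp only [bestP]
  rfl

theorem pbody_isSome (score : List (List Int)) (i : Int) (f : Nat) (avail : List Int) :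
    ∀ (l : List Int) (st : Option Int × List Int), st.1.isSome →
      ((l.foldl (pbody score i f avail) st).1).isSome := by
  intro l
  induction l with
  | nil => intro st h; exact h
  | cons j l' ih =>
    intro st h
    rw [List.foldl_cons]
    apply ih
    cases hst : st.1 with
    | none => rw [hst] at h; simp at h
    | some r =>
      simp only [pbody, hst]
      split_ifs <;> simp [hst]

theorem filter_ne_length (a : Int) (t : List Int) (hnd : (a :: t).Nodup) :
    ∀ j ∈ a :: t, ((a :: t).filter (fun x => decide (x ≠ j))).length = t.length := by
  intro j hj
  have he : (a :: t).erase j = (a :: t).filter (fun x => x != j) := hnd.erase_eq_filter j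
  have hlen : ((a :: t).filter (fun x => x != j)).length = (a :: t).length - 1 := by
    rw [← he]; exact List.length_erase_of_mem hj
  have hsame : (a :: t).filter (fun x => decide (x ≠ j)) = (a :: t).filter (fun x => x != j) := by
    apply List.filter_congr
    intro x _
    by_cases hx : x = j <;> simp [hx]
  rw [hsame, hlen]
  rfl

theorem main_lemma (score : List (List Int)) :
    ∀ (fuel : Nat) (avail : List Int) (i : Int), avail.Nodup → avail.length ≤ fuel →
      fm1 none ((tups avail.length avail).map (fun q => (sumFrom score i q, q)))
        = some (bestP score i fuel avail) := by
  intro fuel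
  induction fuel with
  | zero =>
    intro avail i hnd hle
    have hav : avail = [] := List.eq_nil_of_length_eq_zero (Nat.le_zero.mp hle)
    subst hav
    have hb : bestP score i 0 [] = (0, []) := by simp [bestP]
    rw [hb]; rfl
  | succ f ih =>
    intro avail i hnd hle
    cases avail with
    | nil =>
      have hb : bestP score i (f + 1) [] = (0, []) := by simp [bestP]
      rw [hb]; rfl
    | cons a t =>
      have htup : tups (a :: t).length (a :: t)
          = (a :: t).flatMap
              (fun j => (tups t.length ((a :: t).filter (fun x => decide (x ≠ j)))).map (j :: ·)) := rfl
      rw [htup, List.map_flatMap, fm1_flatMap]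
      rw [bestP_cons]
      -- convert each block to its mapped form
      have hblock : ∀ j ∈ a :: t,
          ((tups t.length ((a :: t).filter (fun x => decide (x ≠ j)))).map (j :: ·)).map
              (fun q => (sumFrom score i q, q))
            = ((tups t.length ((a :: t).filter (fun x => decide (x ≠ j)))).map
                (fun q => (sumFrom score (i + 1) q, q))).map
                (fun sp => (gAt score i j + sp.1, j :: sp.2)) := by
        intro j _
        rw [List.map_map, List.map_map]
        apply List.map_congr_left
        intro q _
        simp [Function.comp, sumFrom]
      -- the inner optimum, from the induction hypothesis
      have hinner : ∀ j ∈ a :: t,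
          fm1 none ((tups t.length ((a :: t).filter (fun x => decide (x ≠ j)))).map
              (fun q => (sumFrom score (i + 1) q, q)))
            = some (bestP score (i + 1) f ((a :: t).filter (fun x => decide (x ≠ j)))) := by
        intro j hj
        have hl := filter_ne_length a t hnd j hj
        have hlf : ((a :: t).filter (fun x => decide (x ≠ j))).length ≤ f := by
          rw [hl]; simp [List.length_cons] at hle; omega
        have hres := ih ((a :: t).filter (fun x => decide (x ≠ j))) (i + 1) (hnd.filter _) hlf
        rw [hl] at hres
        exact hres
      -- fold comparison
      have haux : ∀ (l : List Int), (∀ j ∈ l, j ∈ a :: t) →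
          ∀ (acc : Option (Int × List Int)) (st : Option Int × List Int),
          (acc = match st.1 with | none => none | some r => some (r, st.2)) →
          l.foldl (fun acc j => fm1 acc
              (((tups t.length ((a :: t).filter (fun x => decide (x ≠ j)))).map (j :: ·)).map
                (fun q => (sumFrom score i q, q)))) acc
            = (match (l.foldl (pbody score i f (a :: t)) st).1 with
               | none => none
               | some r => some (r, (l.foldl (pbody score i f (a :: t)) st).2)) := by
        intro l
        induction l with
        | nil => intro _ acc st hrel; exact hrel
        | cons j l' ihl =>
          intro hmem acc st hrel
          have hj : j ∈ a :: t := hmem j List.mem_cons_self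
          rw [List.foldl_cons, List.foldl_cons]
          apply ihl (fun x hx => hmem x (List.mem_cons_of_mem j hx))
          rw [hblock j hj]
          obtain ⟨s1, s2⟩ := st
          cases s1 with
          | none =>
            rw [show acc = none from hrel, fm1_map_mono, hinner j hj]
            simp [pbody, Int.add_comm]
          | some r =>
            rw [show acc = some (r, s2) from hrel, fm1_some, fm1_map_mono, hinner j hj]
            simp only [pbody, Option.map_some, mergeA]
            split_ifs with h1 h2 <;> first | (simp [Int.add_comm]; done) | (exfalso; omega)
      have hfinal := haux (a :: t) (fun x hx => hx) none (none, []) rfl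
      rw [hfinal]
      cases hstf : ((a :: t).foldl (pbody score i f (a :: t)) (none, [])).1 with
      | none =>
        exfalso
        have h1 : (a :: t).foldl (pbody score i f (a :: t)) (none, [])
            = t.foldl (pbody score i f (a :: t)) (pbody score i f (a :: t) (none, []) a) := rfl
        have h2 : (pbody score i f (a :: t) (none, []) a).1.isSome := rfl
        have h3 := pbody_isSome score i f (a :: t) t _ h2
        rw [← h1] at h3
        rw [hstf] at h3
        simp at h3
      | some r => rfl

-- the loop body of bestB, named for the proofs
def bbody (score : List (List Int)) (n : Int) (f : Nat) (avail : List Int) :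
    ((Option Int × List Int) × PySem.Dict (List Int) (Int × List Int)) → Int →
    ((Option Int × List Int) × PySem.Dict (List Int) (Int × List Int)) :=
  fun st k =>
    let j := PySem.List.pyGetD avail k 0
    let sub := PySem.List.slice avail none (some k) ++ PySem.List.slice avail (some (k + 1)) none
    let res := bestB score n f sub st.2
    let s := res.1.1 + PySem.List.pyGetD (PySem.List.pyGetD score (n - PySem.List.len avail) []) j 0
    match st.1.1 with
    | none => ((some s, j :: res.1.2), res.2)
    | some r => if s > r then ((some s, j :: res.1.2), res.2) else (st.1, res.2)

theorem bestB_unfold (score : List (List Int)) (n : Int) (f : Nat) (avail : List Int)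
    (memo : PySem.Dict (List Int) (Int × List Int))
    (hav : ¬ avail = []) (hget : memo.get? avail = none) :
    bestB score n (f + 1) avail memo
      = (let st := (PySem.List.pyRange 0 (PySem.List.len avail) 1).foldl
            (bbody score n f avail) ((none, []), memo);
         ((st.1.1.getD 0, st.1.2), st.2.insert avail (st.1.1.getD 0, st.1.2))) := by
  simp only [bestB, if_neg hav, hget]
  rfl

theorem bestB_correct (score : List (List Int)) (n : Int) :
    ∀ (fuel : Nat) (avail : List Int) (memo : PySem.Dict (List Int) (Int × List Int)),
      avail.Nodup → avail.length ≤ fuel → GoodMemo score n memo →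
      (bestB score n fuel avail memo).1 = bestP score (n - avail.length) avail.length avail
        ∧ GoodMemo score n (bestB score n fuel avail memo).2 := by
  intro fuel
  induction fuel with
  | zero =>
    intro avail memo hnd hle hg
    have hav : avail = [] := List.eq_nil_of_length_eq_zero (Nat.le_zero.mp hle)
    subst hav
    have hb : bestB score n 0 [] memo = ((0, []), memo) := by simp [bestB]
    have hp : bestP score (n - ([] : List Int).length) ([] : List Int).length [] = (0, []) := by
      simp [bestP]
    rw [hb, hp]
    exact ⟨rfl, hg⟩
  | succ f ihf =>
    intro avail memo hnd hle hg
    by_cases hav : avail = []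
    · subst hav
      have hb : bestB score n (f + 1) [] memo = ((0, []), memo) := by simp [bestB]
      have hp : bestP score (n - ([] : List Int).length) ([] : List Int).length [] = (0, []) := by
        simp [bestP]
      rw [hb, hp]
      exact ⟨rfl, hg⟩
    · cases hget : memo.get? avail with
      | some v =>
        have hb : bestB score n (f + 1) avail memo = (v, memo) := by
          simp only [bestB, if_neg hav, hget]
        rw [hb]
        exact ⟨hg avail v hget, hg⟩
      | none =>
        rw [bestB_unfold score n f avail memo hav hget]
        -- nodup decomposition facts used per step
        have haux : ∀ (suf pre : List Int), avail = pre ++ suf →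
            ∀ (stm : (Option Int × List Int) × PySem.Dict (List Int) (Int × List Int)),
              GoodMemo score n stm.2 →
              ((PySem.List.pyRange (pre.length : Int) (PySem.List.len avail) 1).foldl
                  (bbody score n f avail) stm).1
                = suf.foldl (pbody score (n - (avail.length : Int)) (avail.length - 1) avail) stm.1
              ∧ GoodMemo score n
                  ((PySem.List.pyRange (pre.length : Int) (PySem.List.len avail) 1).foldl
                    (bbody score n f avail) stm).2 := by
          intro suf
          induction suf with
          | nil =>
            intro pre happ stm hgm
            have hpre : pre = avail := by rw [happ, List.append_nil]
            have hnil : PySem.List.pyRange (pre.length : Int) (PySem.List.len avail) 1 = [] := by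
              apply PySem.List.pyRange_one_eq_nil
              rw [hpre, PySem.List.len_eq]
            rw [hnil]
            exact ⟨rfl, hgm⟩
          | cons j rest ihs =>
            intro pre happ stm hgm
            have hlen : avail.length = pre.length + rest.length + 1 := by
              rw [happ]; simp [List.length_append]; omega
            have hcons : PySem.List.pyRange (pre.length : Int) (PySem.List.len avail) 1
                = (pre.length : Int) :: PySem.List.pyRange ((pre.length : Int) + 1) (PySem.List.len avail) 1 := by
              apply PySem.List.pyRange_one_cons
              rw [PySem.List.len_eq]
              omega
            obtain ⟨⟨o, pth⟩, mm⟩ := stm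
            have hnd' : (pre ++ j :: rest).Nodup := happ ▸ hnd
            rw [List.nodup_append] at hnd'
            have hjpre : ∀ x ∈ pre, x ≠ j := fun x hx => hnd'.2.2 x hx j List.mem_cons_self
            have hjrest : j ∉ rest := (List.nodup_cons.mp hnd'.2.1).1
            have hjv : PySem.List.pyGetD avail (pre.length : Int) 0 = j := by
              rw [PySem.List.pyGetD_natCast, happ, List.getD_eq_getElem?_getD,
                List.getElem?_append_right (Nat.le_refl pre.length)]
              simp
            have hsub : PySem.List.slice avail none (some (pre.length : Int)) ++
                PySem.List.slice avail (some ((pre.length : Int) + 1)) none = pre ++ rest := by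
              rw [PySem.List.slice_to_natCast,
                show ((pre.length : Int) + 1) = (((pre.length + 1 : Nat)) : Int) by push_cast; ring,
                PySem.List.slice_from_natCast, happ]
              congr 1
              · exact List.take_left
              · rw [show pre ++ j :: rest = (pre ++ [j]) ++ rest by simp,
                  show pre.length + 1 = (pre ++ [j]).length by simp]
                exact List.drop_left
            have hndsub : (pre ++ rest).Nodup := by
              rw [List.nodup_append]
              exact ⟨hnd'.1, (List.nodup_cons.mp hnd'.2.1).2,
                fun x hx b hb => hnd'.2.2 x hx b (List.mem_cons_of_mem j hb)⟩
            have hlensub : (pre ++ rest).length ≤ f := by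
              simp only [List.length_append]; omega
            have hres := ihf (pre ++ rest) mm hndsub hlensub hgm
            have hfil : avail.filter (fun x => decide (x ≠ j)) = pre ++ rest := by
              rw [happ, List.filter_append, List.filter_cons]
              simp only [decide_not, ne_eq]
              rw [if_neg (by simp)]
              congr 1
              · exact List.filter_eq_self.mpr (fun x hx => by simp [hjpre x hx])
              · exact List.filter_eq_self.mpr (fun x hx => by
                  simp; intro hxj; exact hjrest (hxj ▸ hx))
            have hi : n - (((avail.length - 1 : Nat)) : Int) = n - (avail.length : Int) + 1 := by
              omega
            have hlen2 : (pre ++ rest).length = avail.length - 1 := by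
              simp only [List.length_append]; omega
            have hstep : bbody score n f avail ((o, pth), mm) (pre.length : Int)
                = (pbody score (n - (avail.length : Int)) (avail.length - 1) avail (o, pth) j,
                   (bestB score n f (pre ++ rest) mm).2) := by
              cases o with
              | none =>
                simp only [bbody, pbody, PySem.List.len_eq, gAt, hjv, hsub, hfil]
                rw [hres.1, hlen2, hi]
              | some r =>
                simp only [bbody, pbody, PySem.List.len_eq, gAt, hjv, hsub, hfil]
                rw [hres.1, hlen2, hi]
                split_ifs <;> rfl
            rw [hcons, List.foldl_cons, hstep]
            have happ' : avail = (pre ++ [j]) ++ rest := by rw [happ]; simp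
            have hlp : ((pre.length : Int) + 1) = (((pre ++ [j]).length : Nat) : Int) := by
              simp
            rw [hlp]
            have hihs := ihs (pre ++ [j]) happ'
              (pbody score (n - (avail.length : Int)) (avail.length - 1) avail (o, pth) j,
                (bestB score n f (pre ++ rest) mm).2) hres.2
            exact hihs
        have hmain := haux avail [] rfl ((none, []), memo) hg
        have hval : ((((PySem.List.pyRange 0 (PySem.List.len avail) 1).foldl
                (bbody score n f avail) ((none, []), memo)).1.1.getD 0),
              ((PySem.List.pyRange 0 (PySem.List.len avail) 1).foldl
                (bbody score n f avail) ((none, []), memo)).1.2)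
            = bestP score (n - (avail.length : Int)) avail.length avail := by
          rcases avail with _ | ⟨a, t⟩
          · exact absurd rfl hav
          · rw [show ((a :: t).length) = t.length + 1 from rfl, bestP_cons]
            have h0 : ((([] : List Int).length : Nat) : Int) = (0 : Int) := by simp
            rw [h0] at hmain
            rw [hmain.1]
            have hfu : (a :: t).length - 1 = t.length := by simp
            rw [hfu]
            simp [List.length_cons]
        constructor
        · exact hval
        · intro k v hkv
          rw [PySem.Dict.get?_insert] at hkv
          split_ifs at hkv with hk
          · cases hkv
            rw [hk]
            exact hval
          · have h0 : ((([] : List Int).length : Nat) : Int) = (0 : Int) := by simp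
            rw [h0] at hmain
            exact hmain.2 k v hkv

theorem pv_foldl_iterate {α β : Type} (f : List α → List α) :
    ∀ (l : List β) (init : List α), l.foldl (fun acc _ => f acc) init = f^[l.length] init := by
  intro l
  induction l with
  | nil => intro init; rfl
  | cons x t ih =>
    intro init
    rw [List.foldl_cons, ih, List.length_cons, Function.iterate_succ_apply]

-- ===== VERDICT (by name: the statement is the Claim_ definition above) =====
theorem allocate_orders_spec : Claim_equal_allocate_orders := by
  intro score _ _
  unfold Spec_allocate_orders
  by_cases hn : score.length = 0
  · have hsc : score = [] := List.eq_nil_of_length_eq_zero hn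
    subst hsc
    have h1 : allocate_orders ([] : List (List Int)) = [] := by decide
    have h2 : allocate_orders_alt ([] : List (List Int)) = [] := by
      simp [allocate_orders_alt, bestB]
    rw [h1, h2]
  · simp only [allocate_orders, allocate_orders_alt, PySem.List.len_eq]
    rw [PySem.List.foldl_congr_mem (PySem.List.pyRange 1 (score.length : Int) 1) _
        (fun paths _ => paths.flatMap (extend1 (score.length : Int))) _
        (fun acc x _ => stepA_eq (score.length : Int) acc)]
    rw [pv_foldl_iterate (fun L => L.flatMap (extend1 (score.length : Int)))]
    rw [PySem.List.length_pyRange_one]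
    have ht1 : ((score.length : Int) - 1).toNat = score.length - 1 := by omega
    rw [ht1, iterate_flatMap, List.flatMap_map]
    have hj : (fun j => treeExt (score.length : Int) (score.length - 1) [j])
        = (fun j => (tups (score.length - 1)
            ((PySem.List.pyRange 0 (score.length : Int) 1).filter (fun x => decide (x ≠ j)))).map
            (j :: ·)) := by
      funext j
      rw [treeExt_eq_tups]
      rw [show ((PySem.List.pyRange 0 (score.length : Int) 1).filter (fun x => decide (x ∉ [j])))
          = ((PySem.List.pyRange 0 (score.length : Int) 1).filter (fun x => decide (x ≠ j))) from
        List.filter_congr (fun x _ => by simp)]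
      apply List.map_congr_left
      intro q _
      simp
    rw [hj]
    have htup : (PySem.List.pyRange 0 (score.length : Int) 1).flatMap
        (fun j => (tups (score.length - 1)
            ((PySem.List.pyRange 0 (score.length : Int) 1).filter (fun x => decide (x ≠ j)))).map
            (j :: ·))
        = tups ((score.length - 1) + 1) (PySem.List.pyRange 0 (score.length : Int) 1) := rfl
    rw [htup, show score.length - 1 + 1 = score.length from by omega]
    rw [sel_eq]
    rw [show (fun p => (sumA score p, p)) = (fun p : List Int => (sumFrom score 0 p, p)) from
      funext fun p => by rw [sumA_eq]]
    have hRlen : (PySem.List.pyRange 0 (score.length : Int) 1).length = score.length := by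
      rw [PySem.List.length_pyRange_one]; omega
    have hm := main_lemma score score.length (PySem.List.pyRange 0 (score.length : Int) 1) 0
      (PySem.List.nodup_pyRange_one 0 (score.length : Int)) (Nat.le_of_eq hRlen)
    rw [hRlen] at hm
    rw [hm]
    -- B side
    have hGE : GoodMemo score (score.length : Int) PySem.Dict.empty := by
      intro k v h
      rw [PySem.Dict.get?_empty] at h
      cases h
    have hB := bestB_correct score (score.length : Int)
      (PySem.List.pyRange 0 (score.length : Int) 1).length
      (PySem.List.pyRange 0 (score.length : Int) 1) PySem.Dict.empty
      (PySem.List.nodup_pyRange_one 0 (score.length : Int)) (Nat.le_refl _) hGE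
    rw [hB.1]
    rw [show ((score.length : Int)
        - ((PySem.List.pyRange 0 (score.length : Int) 1).length : Int)) = (0 : Int) from by
      rw [hRlen]; omega]
    rw [hRlen]
    split_ifs with hc <;> simp [hc]
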